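-- pv_equiv track=rewrite | github.com/irdkwia/Hamtaro_NazoNazoQ_Text_Editor | Scripts/ModClass.py | GetSel
-- ===== SOURCE A (Python) =====
-- def GetSel(ListCode):
-- 	Str = " ノハバパヒビピフブプへべぺホボポマミムメモャヤュユョヨラリルレ !ヲンヴ%&\"()・+,-./0123456789:;。='?-ABCDEFGHIJKLMNOPQRSTUVWXYZ[¥]「」~abcdefghijklmnopqrstuvwxyzトドナニヌネぁあぃいぅうぇえぉおかがきぎくぐけげこごさざしじすずせぜそぞただちぢっつづてでとどなにぬねのはばぱひびぴふぶぷへべぺほぼぽまみむめもゃやゅゆょよらリるれろ…わロワをんァアィイゥウェエォオ力ガキギクグケゲコゴサザシジスズセゼソゾタダチヂッツヅテデ"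
-- 	StrSpec = "↑→↓←ⒶⒷⓍⓎⓇⓁ♥♪★太郎○✕"
-- 	Sel = ""
-- 	NextFF = False
-- 	NextFE = False
-- 	NextEndSpec = False
-- 	for Nb in ListCode:
-- 		try:
-- 			if not NextFF and not NextFE and not NextEndSpec:
-- 				if Nb==255:
-- 					NextFF = True
-- 				elif Nb==254:
-- 					NextFE = True
-- 				elif Nb==0:
-- 					Sel+="|n00|"
-- 				else:
-- 					Sel+=Str[Nb]
-- 			elif NextEndSpec:
--                                 NextEndSpec = False
--                                 Sel+=str(Nb)+"|"
-- 			elif NextFF: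
-- 				NextFF = False
-- 				if Nb==0:
-- 					Sel+="\n"
-- 				elif Nb==1:
-- 					Sel+="|Next:"
-- 					NextEndSpec = True
-- 				elif Nb==11:
-- 					Sel+="|Start:"
-- 					NextEndSpec = True
-- 				elif Nb==12:
-- 					Sel+="|Pause:"
-- 					NextEndSpec = True
-- 				elif Nb==17:
-- 					Sel+="|End:"
-- 					NextEndSpec = True
-- 				elif Nb==32:
-- 					Sel+="|Black|"
-- 				elif Nb==35:
-- 					Sel+="|Red|"
-- 				elif Nb==38:
-- 					Sel+="|Blue|"
-- 				else:
-- 					Sel+="|x"+str(Nb)+"|"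
-- 			else:
-- 				NextFE = False
-- 				try:
-- 					Sel+=StrSpec[Nb]
-- 				except:
-- 					Sel+="|c"+str(Nb)+"|"
--
-- 		except:
-- 			Sel+="|n"+str(Nb)+"|"
-- 	return Sel
-- ===== SOURCE B (Python) =====
-- # B: explicit-index while loop consuming whole multi-byte sequences per step,
-- # collecting fragments joined at the end, instead of A's per-byte flag state machine.
-- def GetSel(ListCode):
--     Str = " ノハバパヒビピフブプへべぺホボポマミムメモャヤュユョヨラリルレ !ヲンヴ%&\"()・+,-./0123456789:;。='?-ABCDEFGHIJKLMNOPQRSTUVWXYZ[¥]「」~abcdefghijklmnopqrstuvwxyzトドナニヌネぁあぃいぅうぇえぉおかがきぎくぐけげこごさざしじすずせぜそぞただちぢっつづてでとどなにぬねのはばぱひびぴふぶぷへべぺほぼぽまみむめもゃやゅゆょよらリるれろ…わロワをんァアィイゥウェエォオ力ガキギクグケゲコゴサザシジスズセゼソゾタダチヂッツヅテデ"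
--     StrSpec = "↑→↓←ⒶⒷⓍⓎⓇⓁ♥♪★太郎○✕"
--     Cmd = {1: "|Next:", 11: "|Start:", 12: "|Pause:", 17: "|End:"}
--     data = list(ListCode)
--     n = len(data)
--     out = []
--     i = 0
--     while i < n:
--         b = data[i]
--         if b == 255:
--             if i + 1 >= n:
--                 break
--             c = data[i + 1]
--             i += 2
--             if c == 0:
--                 out.append("\n")
--             elif c in Cmd:
--                 out.append(Cmd[c])
--                 if i < n:
--                     out.append(str(data[i]) + "|")
--                     i += 1
--             elif c == 32:
--                 out.append("|Black|")
--             elif c == 35: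
--                 out.append("|Red|")
--             elif c == 38:
--                 out.append("|Blue|")
--             else:
--                 out.append("|x" + str(c) + "|")
--         elif b == 254:
--             if i + 1 >= n:
--                 break
--             c = data[i + 1]
--             i += 2
--             try:
--                 out.append(StrSpec[c])
--             except IndexError:
--                 out.append("|c" + str(c) + "|")
--         elif b == 0:
--             out.append("|n00|")
--             i += 1
--         else:
--             try:
--                 out.append(Str[b])
--             except IndexError:
--                 out.append("|n" + str(b) + "|")
--             i += 1
--     return "".join(out)
-- ===== Notes on version B (the rewrite author's own statement) =====
-- stated objective: alternative
-- what changed: Replaces A's one-byte-per-iteration state machine with three boolean flags by an index-based while loop that consumes each whole 1-3 byte escape sequence in a single step and joins collected fragments at the end.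
import Mathlib
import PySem

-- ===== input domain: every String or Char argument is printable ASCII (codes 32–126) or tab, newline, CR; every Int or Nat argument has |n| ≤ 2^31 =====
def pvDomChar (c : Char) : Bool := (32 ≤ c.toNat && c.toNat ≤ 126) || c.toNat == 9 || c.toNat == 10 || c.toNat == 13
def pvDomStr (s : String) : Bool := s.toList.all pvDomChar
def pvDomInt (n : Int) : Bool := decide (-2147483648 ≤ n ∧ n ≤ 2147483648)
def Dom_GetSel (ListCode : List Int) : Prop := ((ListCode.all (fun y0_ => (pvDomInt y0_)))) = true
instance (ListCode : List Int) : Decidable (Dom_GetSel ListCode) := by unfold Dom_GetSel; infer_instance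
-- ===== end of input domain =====

-- B replaces A's per-byte boolean-flag state machine by an index loop that consumes each
-- whole escape sequence (1–3 bytes) in one step and joins collected fragments (objective: alternative).

-- ===== PORT A =====
-- the base character table Str (as code points)
def pvBaseChars : List Char := " ノハバパヒビピフブプへべぺホボポマミムメモャヤュユョヨラリルレ !ヲンヴ%&\"()・+,-./0123456789:;。='?-ABCDEFGHIJKLMNOPQRSTUVWXYZ[¥]「」~abcdefghijklmnopqrstuvwxyzトドナニヌネぁあぃいぅうぇえぉおかがきぎくぐけげこごさざしじすずせぜそぞただちぢっつづてでとどなにぬねのはばぱひびぴふぶぷへべぺほぼぽまみむめもゃやゅゆょよらリるれろ…わロワをんァアィイゥウェエォオ力ガキギクグケゲコゴサザシジスズセゼソゾタダチヂッツヅテデ".toList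

-- the special character table StrSpec
def pvSpecChars : List Char := "↑→↓←ⒶⒷⓍⓎⓇⓁ♥♪★太郎○✕".toList

-- A's loop state: Sel (as code points) and the three flags
structure PvStA where
  sel : List Char
  nFF : Bool
  nFE : Bool
  nES : Bool
deriving Repr

-- one iteration of A's for-loop (Sel += x becomes sel ++ x.toList; try/except via pyGet?)
def pvStepA (st : PvStA) (Nb : Int) : PvStA :=
  if !st.nFF && !st.nFE && !st.nES then
    if Nb = 255 then { st with nFF := true }
    else if Nb = 254 then { st with nFE := true }
    else if Nb = 0 then { st with sel := st.sel ++ "|n00|".toList }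
    else
      match PySem.List.pyGet? pvBaseChars Nb with
      | some ch => { st with sel := st.sel ++ [ch] }
      | none => { st with sel := st.sel ++ "|n".toList ++ PySem.Int.toChars Nb ++ ['|'] }
  else if st.nES then
    { st with nES := false, sel := st.sel ++ PySem.Int.toChars Nb ++ ['|'] }
  else if st.nFF then
    if Nb = 0 then { st with nFF := false, sel := st.sel ++ ['\n'] }
    else if Nb = 1 then { st with nFF := false, nES := true, sel := st.sel ++ "|Next:".toList }
    else if Nb = 11 then { st with nFF := false, nES := true, sel := st.sel ++ "|Start:".toList }
    else if Nb = 12 then { st with nFF := false, nES := true, sel := st.sel ++ "|Pause:".toList }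
    else if Nb = 17 then { st with nFF := false, nES := true, sel := st.sel ++ "|End:".toList }
    else if Nb = 32 then { st with nFF := false, sel := st.sel ++ "|Black|".toList }
    else if Nb = 35 then { st with nFF := false, sel := st.sel ++ "|Red|".toList }
    else if Nb = 38 then { st with nFF := false, sel := st.sel ++ "|Blue|".toList }
    else { st with nFF := false, sel := st.sel ++ "|x".toList ++ PySem.Int.toChars Nb ++ ['|'] }
  else
    { st with
      nFE := false
      sel := st.sel ++
        (match PySem.List.pyGet? pvSpecChars Nb with
         | some ch => [ch]
         | none => "|c".toList ++ PySem.Int.toChars Nb ++ ['|']) }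

def GetSel (ListCode : List Int) : String :=
  String.ofList (ListCode.foldl pvStepA ⟨[], false, false, false⟩).sel

-- ===== PORT B =====
-- the label dictionary Cmd for commands 1/11/12/17
def pvCmdLabel (c : Int) : List Char :=
  if c = 1 then "|Next:".toList
  else if c = 11 then "|Start:".toList
  else if c = 12 then "|Pause:".toList
  else "|End:".toList

-- B's while loop: the argument of each function is the unread suffix data[i:]; one
-- fragment is emitted per append and each step consumes the 1–3 bytes of one
-- sequence (break at end of data = stop with []); the helpers are the loop body's
-- phases after reading 255 (pvAltFF), after a command needing a number (pvAltNum),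
-- and after reading 254 (pvAltFE).
mutual
def pvAltGo : List Int → List (List Char)
  | [] => []
  | b :: rest =>
    if b = 255 then pvAltFF rest
    else if b = 254 then pvAltFE rest
    else if b = 0 then "|n00|".toList :: pvAltGo rest
    else
      (match PySem.List.pyGet? pvBaseChars b with
       | some ch => [ch]
       | none => "|n".toList ++ PySem.Int.toChars b ++ ['|']) :: pvAltGo rest

def pvAltFF : List Int → List (List Char)
  | [] => []
  | c :: rest2 =>
    if c = 0 then ['\n'] :: pvAltGo rest2
    else if c = 1 ∨ c = 11 ∨ c = 12 ∨ c = 17 then pvCmdLabel c :: pvAltNum rest2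
    else if c = 32 then "|Black|".toList :: pvAltGo rest2
    else if c = 35 then "|Red|".toList :: pvAltGo rest2
    else if c = 38 then "|Blue|".toList :: pvAltGo rest2
    else ("|x".toList ++ PySem.Int.toChars c ++ ['|']) :: pvAltGo rest2

def pvAltNum : List Int → List (List Char)
  | [] => []
  | d :: rest3 => (PySem.Int.toChars d ++ ['|']) :: pvAltGo rest3

def pvAltFE : List Int → List (List Char)
  | [] => []
  | c :: rest2 =>
    (match PySem.List.pyGet? pvSpecChars c with
     | some ch => [ch]
     | none => "|c".toList ++ PySem.Int.toChars c ++ ['|']) :: pvAltGo rest2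
end

def GetSel_alt (ListCode : List Int) : String :=
  String.ofList (pvAltGo ListCode).flatten

-- ===== PRECONDITION & SPEC =====
def Spec_GetSel (ListCode : List Int) (out : String) : Prop := out = GetSel_alt ListCode
instance (ListCode : List Int) (out : String) : Decidable (Spec_GetSel ListCode out) := by unfold Spec_GetSel; infer_instance

-- ===== CLAIM (what is proved, stated in full; the proofs are below) =====
def Claim_equal_GetSel : Prop := ∀ (ListCode : List Int), Dom_GetSel ListCode → Spec_GetSel ListCode (GetSel ListCode)

-- ===== LEMMAS AND PROOFS =====

-- the loop invariant: A's fold from a clean-flag state appends exactly B's joined fragments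
theorem pvFold_eq_alt : ∀ (n : Nat) (l : List Int), l.length ≤ n → ∀ (s : List Char),
    (l.foldl pvStepA ⟨s, false, false, false⟩).sel = s ++ (pvAltGo l).flatten := by
  intro n
  induction n with
  | zero =>
    intro l hl s
    have hnil : l = [] := List.eq_nil_of_length_eq_zero (Nat.le_zero.mp hl)
    subst hnil; simp [pvAltGo]
  | succ n ih =>
    intro l hl s
    match l with
    | [] => simp [pvAltGo]
    | b :: rest =>
      by_cases hb255 : b = 255
      · subst hb255
        match rest with
        | [] => simp [pvAltGo, pvAltFF, pvStepA]
        | c :: rest2 =>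
          have h2 : rest2.length ≤ n := by simp at hl; omega
          by_cases hc0 : c = 0
          · subst hc0
            simp [List.foldl_cons, pvStepA, pvAltGo, pvAltFF, ih rest2 h2]
          · by_cases hcmd : c = 1 ∨ c = 11 ∨ c = 12 ∨ c = 17
            · match rest2 with
              | [] =>
                rcases hcmd with hc | hc | hc | hc <;> subst hc <;>
                  simp [List.foldl_cons, pvStepA, pvAltGo, pvAltFF, pvAltNum, pvCmdLabel]
              | d :: rest3 =>
                have h3 : rest3.length ≤ n := by simp at hl; omega
                rcases hcmd with hc | hc | hc | hc <;> subst hc <;>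
                  simp [List.foldl_cons, pvStepA, pvAltGo, pvAltFF, pvAltNum, pvCmdLabel,
                    ih rest3 h3]
            · have h1 : ¬ c = 1 := fun h => hcmd (Or.inl h)
              have h11 : ¬ c = 11 := fun h => hcmd (Or.inr (Or.inl h))
              have h12 : ¬ c = 12 := fun h => hcmd (Or.inr (Or.inr (Or.inl h)))
              have h17 : ¬ c = 17 := fun h => hcmd (Or.inr (Or.inr (Or.inr h)))
              by_cases hc32 : c = 32
              · subst hc32; simp [List.foldl_cons, pvStepA, pvAltGo, pvAltFF, ih rest2 h2]
              · by_cases hc35 : c = 35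
                · subst hc35; simp [List.foldl_cons, pvStepA, pvAltGo, pvAltFF, ih rest2 h2]
                · by_cases hc38 : c = 38
                  · subst hc38
                    simp [List.foldl_cons, pvStepA, pvAltGo, pvAltFF, ih rest2 h2]
                  · simp [List.foldl_cons, pvStepA, pvAltGo, pvAltFF, ih rest2 h2,
                      hc0, h1, h11, h12, h17, hc32, hc35, hc38]
      · by_cases hb254 : b = 254
        · subst hb254
          match rest with
          | [] => simp [pvAltGo, pvAltFE, pvStepA]
          | c :: rest2 =>
            have h2 : rest2.length ≤ n := by simp at hl; omega
            cases h : PySem.List.pyGet? pvSpecChars c <;>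
              simp [List.foldl_cons, pvStepA, pvAltGo, pvAltFE, ih rest2 h2, h]
        · have h1 : rest.length ≤ n := by simp at hl; omega
          by_cases hb0 : b = 0
          · subst hb0; simp [List.foldl_cons, pvStepA, pvAltGo, ih rest h1]
          · cases h : PySem.List.pyGet? pvBaseChars b <;>
              simp [List.foldl_cons, pvStepA, pvAltGo, ih rest h1, hb255, hb254, hb0, h]

-- ===== VERDICT (by name: the statement is the Claim_ definition above) =====
theorem GetSel_spec : Claim_equal_GetSel := by
  intro l _
  unfold Spec_GetSel GetSel GetSel_alt
  rw [pvFold_eq_alt l.length l (le_refl _)]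
  simp
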